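-- pv_equiv track=rewrite | github.com/Eduardo-Ingles/AI_Helper | backend/scripts/SharedCode/sharedCode.py | defineChunkSize
-- ===== SOURCE A (Python) =====
-- def defineChunkSize(CpuCores:int, dataSetSize:int):
--     """
--     Calcola la dimensione dei dati da suddividere su tutti i core in maniera omogenea.
--     """
--     chunk_size = int(dataSetSize / CpuCores)
--     remainder = dataSetSize % CpuCores
--     chunks = []
--     start_index = 0
--     for i in range(CpuCores):
--         end_index = start_index + chunk_size
--         if i < remainder:   # Distribute the remainder across the first few chunks
--             end_index += 1
--         chunks.append((start_index, end_index))
--         start_index = end_index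
--     return chunks
-- ===== SOURCE B (Python) =====
-- def defineChunkSize(CpuCores: int, dataSetSize: int):
--     """
--     Same balanced chunk ranges, but each (start, end) pair is computed
--     directly from its index i in closed form, with no carried start_index.
--     """
--     chunk_size = int(dataSetSize / CpuCores)
--     remainder = dataSetSize % CpuCores
--     return [(i * chunk_size + min(i, remainder),
--              (i + 1) * chunk_size + min(i + 1, remainder))
--             for i in range(CpuCores)]
-- ===== Notes on version B (the rewrite author's own statement) =====
-- stated objective: alternative
-- what changed: Replaces the loop carrying a running start_index accumulator with a closed-form per-index computation: chunk i is (i*chunk_size + min(i, remainder), (i+1)*chunk_size + min(i+1, remainder)), so every chunk is independent of the previous ones.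
import Mathlib
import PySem

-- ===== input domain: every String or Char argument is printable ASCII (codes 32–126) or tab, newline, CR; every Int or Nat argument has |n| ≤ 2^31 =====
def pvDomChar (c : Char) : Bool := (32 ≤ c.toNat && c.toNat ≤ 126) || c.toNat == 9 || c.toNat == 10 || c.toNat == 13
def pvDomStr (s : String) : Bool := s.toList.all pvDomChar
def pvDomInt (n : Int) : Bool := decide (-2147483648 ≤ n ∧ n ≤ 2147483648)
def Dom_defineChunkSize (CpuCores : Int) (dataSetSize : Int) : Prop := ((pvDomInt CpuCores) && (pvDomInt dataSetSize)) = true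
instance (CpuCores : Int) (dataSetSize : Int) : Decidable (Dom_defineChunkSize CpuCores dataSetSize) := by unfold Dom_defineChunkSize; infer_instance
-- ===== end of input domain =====

-- B computes each chunk's (start, end) in closed form from its index instead of carrying a running start_index; alternative decomposition, same cost.


-- ===== PORT A =====
-- int(dataSetSize / CpuCores) truncates the float quotient toward zero; on Dom (|n| ≤ 2^31 < 2^53)
-- the float division rounds within 1/|CpuCores| of the exact quotient, so the truncation equals
-- exact truncating division Int.tdiv.
def defineChunkSize (CpuCores : Int) (dataSetSize : Int) : List (Int × Int) :=
  let chunk_size := dataSetSize.tdiv CpuCores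
  let remainder := PySem.Int.mod dataSetSize CpuCores
  let st := (PySem.List.pyRange 0 CpuCores 1).foldl
    (fun (st : List (Int × Int) × Int) i =>
      let end_index := st.2 + chunk_size
      let end_index := if i < remainder then end_index + 1 else end_index
      (st.1 ++ [(st.2, end_index)], end_index)) ([], 0)
  st.1

-- ===== PORT B =====
def defineChunkSize_alt (CpuCores : Int) (dataSetSize : Int) : List (Int × Int) :=
  let chunk_size := dataSetSize.tdiv CpuCores
  let remainder := PySem.Int.mod dataSetSize CpuCores
  (PySem.List.pyRange 0 CpuCores 1).map (fun i =>
    (i * chunk_size + min i remainder,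
     (i + 1) * chunk_size + min (i + 1) remainder))

-- ===== PRECONDITION & SPEC =====
-- Python raises ZeroDivisionError when CpuCores = 0; excluded.
def Pre_defineChunkSize (CpuCores : Int) (dataSetSize : Int) : Prop := CpuCores ≠ 0
instance (CpuCores : Int) (dataSetSize : Int) : Decidable (Pre_defineChunkSize CpuCores dataSetSize) := by unfold Pre_defineChunkSize; infer_instance
def pvWitness_defineChunkSize : Int × Int := (4, 10)

def Spec_defineChunkSize (CpuCores : Int) (dataSetSize : Int) (out : List (Int × Int)) : Prop := out = defineChunkSize_alt CpuCores dataSetSize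
instance (CpuCores : Int) (dataSetSize : Int) (out : List (Int × Int)) : Decidable (Spec_defineChunkSize CpuCores dataSetSize out) := by unfold Spec_defineChunkSize; infer_instance

-- ===== CLAIM (what is proved, stated in full; the proofs are below) =====
def Claim_equal_defineChunkSize : Prop := ∀ (CpuCores : Int) (dataSetSize : Int), Dom_defineChunkSize CpuCores dataSetSize → Pre_defineChunkSize CpuCores dataSetSize → Spec_defineChunkSize CpuCores dataSetSize (defineChunkSize CpuCores dataSetSize)

-- ===== LEMMAS AND PROOFS =====

-- Invariant of A's fold over range(n): the accumulated list is B's closed-form map and the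
-- carried start_index equals n*cs + min n r.
lemma chunk_fold_eq (cs r : Int) (hr : 0 ≤ r) (n : Nat) :
    (PySem.List.pyRange 0 (n : Int) 1).foldl
      (fun (st : List (Int × Int) × Int) i =>
        let end_index := st.2 + cs
        let end_index := if i < r then end_index + 1 else end_index
        (st.1 ++ [(st.2, end_index)], end_index)) ([], 0)
    = ((PySem.List.pyRange 0 (n : Int) 1).map (fun i =>
        (i * cs + min i r, (i + 1) * cs + min (i + 1) r)),
       (n : Int) * cs + min (n : Int) r) := by
  induction n with
  | zero =>
    simp [PySem.List.pyRange_one_eq_nil (by omega : (0:Int) ≤ 0)]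
    omega
  | succ n ih =>
    have hsplit : PySem.List.pyRange 0 ((n + 1 : Nat) : Int) 1
        = PySem.List.pyRange 0 (n : Int) 1 ++ [(n : Int)] := by
      push_cast
      exact PySem.List.pyRange_one_succ_right (by omega)
    rw [hsplit, List.foldl_append, List.map_append, ih]
    have hmul : ((n : Int) + 1) * cs = (n : Int) * cs + cs := by ring
    simp only [List.foldl_cons, List.foldl_nil, List.map_cons, List.map_nil, Prod.mk.injEq,
      List.append_cancel_left_eq, List.cons.injEq, and_true]
    push_cast
    rw [hmul]
    split_ifs with h <;> refine ⟨⟨trivial, by omega⟩, by omega⟩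

-- ===== VERDICT (by name: the statement is the Claim_ definition above) =====
theorem defineChunkSize_spec : Claim_equal_defineChunkSize := by
  intro cc ds _ hcc
  unfold Spec_defineChunkSize
  dsimp only [defineChunkSize, defineChunkSize_alt]
  by_cases hpos : 0 < cc
  · have hr : 0 ≤ PySem.Int.mod ds cc := by
      have := PySem.Int.mod_eq_emod_of_pos (a := ds) (b := cc) hpos
      rw [this]
      exact Int.emod_nonneg ds (by omega)
    have hcast : cc = ((cc.toNat : Nat) : Int) := (Int.toNat_of_nonneg (by omega)).symm
    rw [hcast] at hr ⊢
    rw [chunk_fold_eq _ _ hr cc.toNat]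
  · have : cc ≤ 0 := by omega
    rw [PySem.List.pyRange_one_eq_nil this]
    simp
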